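-- pv_equiv track=rewrite | github.com/Sallyrideauto/codetree-TILs | 240808/이상한 폭탄 3/strange-bomb-3.py | find_most_exploded_bomb
-- ===== SOURCE A (Python) =====
-- def find_most_exploded_bomb(N, K, bomb_numbers):
--     from collections import defaultdict
--
--     # Dictionary to kepp track of bomb explosions
--     bomb_explosion_count = defaultdict(int)
--
--     # Iterate through each bomb and check its distance with others
--     for i in range(N):
--         for j in range(i + 1, min(i + K + 1, N)):
--             if bomb_numbers[i] == bomb_numbers[j]:
--                 bomb_explosion_count[bomb_numbers[i]] += 1
--                 bomb_explosion_count[bomb_numbers[j]] += 1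
--
--     # Find the bomb with the maximum explosion count
--     max_explosions = 0
--     max_exploede_bomb = 0
--
--     for bomb, count in bomb_explosion_count.items():
--         if count > max_explosions or (count == max_explosions and bomb > max_exploede_bomb):
--             max_explosions = count
--             max_exploede_bomb = bomb
--
--     return max_exploede_bomb
-- ===== SOURCE B (Python) =====
-- def find_most_exploded_bomb(N, K, bomb_numbers):
--     # Sliding window of the last K indices with a value->frequency dict: one O(N) pass
--     # instead of A's O(N*K) nested scan.  No pair can be within distance K when K <= 0
--     # (and no pair exists when N <= 1), so nothing explodes then.
--     if K <= 0 or N <= 1: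
--         return 0
--     window = {}
--     counts = {}
--     for j in range(N):
--         old = j - K - 1
--         if old >= 0:
--             ov = bomb_numbers[old]
--             window[ov] = window.get(ov, 0) - 1
--         v = bomb_numbers[j]
--         w = window.get(v, 0)
--         if w:
--             counts[v] = counts.get(v, 0) + 2 * w
--         window[v] = window.get(v, 0) + 1
--     best_c, best_v = 0, 0
--     for v, c in counts.items():
--         if (c, v) > (best_c, best_v):
--             best_c, best_v = c, v
--     return best_v
-- ===== Notes on version B (the rewrite author's own statement) =====
-- stated objective: faster
-- what changed: Replaced A's nested O(N*K) scan of all index pairs within distance K by a single left-to-right pass that maintains a sliding-window value-frequency dict of the last K elements, adding 2*frequency per position; the winner is then the (count, value)-lexicographic maximum.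
import Mathlib
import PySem

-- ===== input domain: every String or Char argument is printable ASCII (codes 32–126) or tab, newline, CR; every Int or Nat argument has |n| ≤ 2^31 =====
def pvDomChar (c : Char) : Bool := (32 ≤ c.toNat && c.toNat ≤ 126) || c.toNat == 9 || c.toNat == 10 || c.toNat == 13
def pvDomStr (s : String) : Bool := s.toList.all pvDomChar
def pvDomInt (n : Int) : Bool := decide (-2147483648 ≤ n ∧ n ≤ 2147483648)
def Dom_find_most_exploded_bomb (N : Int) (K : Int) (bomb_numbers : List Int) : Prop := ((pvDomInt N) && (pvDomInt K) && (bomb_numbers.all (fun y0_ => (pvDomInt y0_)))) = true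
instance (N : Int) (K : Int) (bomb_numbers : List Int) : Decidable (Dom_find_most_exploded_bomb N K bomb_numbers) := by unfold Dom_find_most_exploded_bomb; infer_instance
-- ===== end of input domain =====

-- B replaces A's nested O(N*K) pair scan by one sliding-window pass with a value-frequency
-- dict (objective: faster, asymptotic O(N) vs O(N*K)).

-- ===== PORT A =====
def find_most_exploded_bomb (N : Int) (K : Int) (bomb_numbers : List Int) : Int :=
  -- for i in range(N): for j in range(i+1, min(i+K+1, N)): if a[i]==a[j]: d[a[i]]+=1; d[a[j]]+=1
  let d : PySem.Dict Int Int :=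
    (PySem.List.pyRange 0 N 1).foldl (fun d i =>
      (PySem.List.pyRange (i + 1) (min (i + K + 1) N) 1).foldl (fun d j =>
        if PySem.List.pyGetD bomb_numbers i 0 == PySem.List.pyGetD bomb_numbers j 0 then
          ((d.modify (PySem.List.pyGetD bomb_numbers i 0) 0 (· + 1)).modify
            (PySem.List.pyGetD bomb_numbers j 0) 0 (· + 1))
        else d) d) PySem.Dict.empty
  -- for bomb, count in d.items(): if count > mc or (count == mc and bomb > mb): mc, mb = count, bomb
  let r : Int × Int :=
    d.items.foldl (fun s p =>
      if p.2 > s.1 ∨ (p.2 = s.1 ∧ p.1 > s.2) then (p.2, p.1) else s) ((0 : Int), (0 : Int))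
  r.2

-- ===== PORT B =====
def find_most_exploded_bomb_alt (N : Int) (K : Int) (bomb_numbers : List Int) : Int :=
  if K ≤ 0 ∨ N ≤ 1 then 0
  else
    -- one pass: window = freq of the last K values, counts[v] += 2*window[v] at each step
    let st : PySem.Dict Int Int × PySem.Dict Int Int :=
      (PySem.List.pyRange 0 N 1).foldl (fun st j =>
        let old := j - K - 1
        let win :=
          if old ≥ 0 then
            st.1.insert (PySem.List.pyGetD bomb_numbers old 0)
              (st.1.getD (PySem.List.pyGetD bomb_numbers old 0) 0 - 1)
          else st.1
        let v := PySem.List.pyGetD bomb_numbers j 0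
        let w := win.getD v 0
        let counts := if w ≠ 0 then st.2.insert v (st.2.getD v 0 + 2 * w) else st.2
        (win.insert v (win.getD v 0 + 1), counts)) (PySem.Dict.empty, PySem.Dict.empty)
    -- for v, c in counts.items(): if (c, v) > (best_c, best_v): ...
    let r : Int × Int :=
      st.2.items.foldl (fun s p =>
        if p.2 > s.1 ∨ (p.2 = s.1 ∧ p.1 > s.2) then (p.2, p.1) else s) ((0 : Int), (0 : Int))
    r.2

-- ===== PRECONDITION & SPEC =====
-- Pre_ excludes exactly the inputs where the Python A raises IndexError (it indexes
-- bomb_numbers[0..N-1] as soon as K ≥ 1 and N ≥ 2); everywhere A returns, Pre_ holds.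
def Pre_find_most_exploded_bomb (N : Int) (K : Int) (bomb_numbers : List Int) : Prop :=
  N ≤ (bomb_numbers.length : Int) ∨ K ≤ 0 ∨ N ≤ 1
instance (N : Int) (K : Int) (bomb_numbers : List Int) : Decidable (Pre_find_most_exploded_bomb N K bomb_numbers) := by unfold Pre_find_most_exploded_bomb; infer_instance

def pvWitness_find_most_exploded_bomb : Int × Int × List Int := (4, 2, [1, 2, 1, 2])

def Spec_find_most_exploded_bomb (N : Int) (K : Int) (bomb_numbers : List Int) (out : Int) : Prop := out = find_most_exploded_bomb_alt N K bomb_numbers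
instance (N : Int) (K : Int) (bomb_numbers : List Int) (out : Int) : Decidable (Spec_find_most_exploded_bomb N K bomb_numbers out) := by unfold Spec_find_most_exploded_bomb; infer_instance

-- ===== CLAIM (what is proved, stated in full; the proofs are below) =====
def Claim_equal_find_most_exploded_bomb : Prop := ∀ (N : Int) (K : Int) (bomb_numbers : List Int), Dom_find_most_exploded_bomb N K bomb_numbers → Pre_find_most_exploded_bomb N K bomb_numbers → Spec_find_most_exploded_bomb N K bomb_numbers (find_most_exploded_bomb N K bomb_numbers)


-- ===== LEMMAS AND PROOFS =====

-- value of the list at an Int index, as both ports read it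
def pvAv (a : List Int) (i : Int) : Int := PySem.List.pyGetD a i 0

-- the events a matching pair (i, j) contributes to the counting dict
def pvEv (a : List Int) (p : Int × Int) : List Int :=
  if pvAv a p.1 == pvAv a p.2 then [pvAv a p.1, pvAv a p.2] else []

-- A's pair enumeration (by first index) and B's (by second index)
def pvPA (N K : Int) : List (Int × Int) :=
  (PySem.List.pyRange 0 N 1).flatMap (fun i =>
    (PySem.List.pyRange (i + 1) (min (i + K + 1) N) 1).map (fun j => (i, j)))
def pvPB (N K : Int) : List (Int × Int) :=
  (PySem.List.pyRange 0 N 1).flatMap (fun j =>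
    (PySem.List.pyRange (max 0 (j - K)) j 1).map (fun i => (i, j)))

def pvEA (N K : Int) (a : List Int) : List Int := (pvPA N K).flatMap (pvEv a)
def pvEB (N K : Int) (a : List Int) : List Int := (pvPB N K).flatMap (pvEv a)

-- B's per-position event block
def pvBlock (K : Int) (a : List Int) (j : Int) : List Int :=
  ((PySem.List.pyRange (max 0 (j - K)) j 1).map (fun i => (i, j))).flatMap (pvEv a)

-- the window contents before processing index n
def pvWinL (K : Int) (a : List Int) (n : Int) : List Int :=
  (PySem.List.pyRange (max 0 (n - 1 - K)) n 1).map (pvAv a)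

-- the selection step both final loops perform
def pvSel (s : Int × Int) (p : Int × Int) : Int × Int :=
  if p.2 > s.1 ∨ (p.2 = s.1 ∧ p.1 > s.2) then (p.2, p.1) else s

-- B's loop body
def pvStepB (K : Int) (a : List Int) (st : PySem.Dict Int Int × PySem.Dict Int Int) (j : Int) :
    PySem.Dict Int Int × PySem.Dict Int Int :=
  let old := j - K - 1
  let win :=
    if old ≥ 0 then
      st.1.insert (PySem.List.pyGetD a old 0) (st.1.getD (PySem.List.pyGetD a old 0) 0 - 1)
    else st.1
  let v := PySem.List.pyGetD a j 0
  let w := win.getD v 0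
  let counts := if w ≠ 0 then st.2.insert v (st.2.getD v 0 + 2 * w) else st.2
  (win.insert v (win.getD v 0 + 1), counts)

-- ---- A's dict is the counter of its event list ----
theorem dictA_eq (N K : Int) (a : List Int) :
    (PySem.List.pyRange 0 N 1).foldl (fun d i =>
      (PySem.List.pyRange (i + 1) (min (i + K + 1) N) 1).foldl (fun d j =>
        if PySem.List.pyGetD a i 0 == PySem.List.pyGetD a j 0 then
          ((d.modify (PySem.List.pyGetD a i 0) 0 (· + 1)).modify
            (PySem.List.pyGetD a j 0) 0 (· + 1))
        else d) d) PySem.Dict.empty = PySem.Dict.counter (pvEA N K a) := by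
  rw [PySem.Dict.counter_eq_foldl]
  unfold pvEA pvPA
  rw [List.foldl_flatMap, List.foldl_flatMap]
  refine (PySem.List.foldl_congr_mem _ _ _ _ ?_)
  intro d i _
  rw [List.foldl_map]
  refine (PySem.List.foldl_congr_mem _ _ _ _ ?_)
  intro d' j _
  by_cases h : PySem.List.pyGetD a i 0 == PySem.List.pyGetD a j 0
  · simp [pvEv, pvAv, h, List.foldl]
  · simp [pvEv, pvAv, h]

-- ---- the two pair enumerations are permutations of each other ----
theorem perm_PA_PB (N K : Int) (_hK : 1 ≤ K) : (pvPA N K).Perm (pvPB N K) := by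
  have hnda : (pvPA N K).Nodup := by
    unfold pvPA
    rw [List.nodup_flatMap]
    constructor
    · intro i _
      exact (PySem.List.nodup_pyRange_one _ _).map (fun x y h => by
        simpa using congrArg Prod.snd h)
    · refine (PySem.List.pairwise_lt_pyRange_one 0 N).imp ?_
      intro i i' hlt p hp hp'
      simp only [List.mem_map] at hp hp'
      obtain ⟨j, _, rfl⟩ := hp
      obtain ⟨j', _, h2⟩ := hp'
      have := congrArg Prod.fst h2
      simp at this
      omega
  have hndb : (pvPB N K).Nodup := by
    unfold pvPB
    rw [List.nodup_flatMap]
    constructor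
    · intro j _
      exact (PySem.List.nodup_pyRange_one _ _).map (fun x y h => by
        simpa using congrArg Prod.fst h)
    · refine (PySem.List.pairwise_lt_pyRange_one 0 N).imp ?_
      intro j j' hlt p hp hp'
      simp only [List.mem_map] at hp hp'
      obtain ⟨i, _, rfl⟩ := hp
      obtain ⟨i', _, h2⟩ := hp'
      have := congrArg Prod.snd h2
      simp at this
      omega
  refine (List.perm_ext_iff_of_nodup hnda hndb).mpr ?_
  rintro ⟨pi, pj⟩
  simp only [pvPA, pvPB, List.mem_flatMap, List.mem_map, PySem.List.mem_pyRange_one,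
    Prod.mk.injEq]
  constructor <;>
    (rintro ⟨x, hx, y, hy, rfl, rfl⟩; exact ⟨y, by omega, x, by omega, rfl, rfl⟩)

theorem perm_EA_EB (N K : Int) (a : List Int) (hK : 1 ≤ K) :
    (pvEA N K a).Perm (pvEB N K a) :=
  (perm_PA_PB N K hK).flatMap (fun _ _ => List.Perm.refl _)

-- ---- count of one event block ----
theorem block_count_aux (a : List Int) (t v : Int) (l : List Int) :
    (l.flatMap (fun i => pvEv a (i, t))).count v =
      if v = pvAv a t then 2 * ((l.map (pvAv a)).count (pvAv a t)) else 0 := by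
  induction l with
  | nil => simp
  | cons i tl ih =>
    simp only [List.flatMap_cons, List.count_append, List.map_cons, List.count_cons, ih]
    by_cases h : pvAv a i == pvAv a t
    · have he : pvAv a i = pvAv a t := by exact eq_of_beq h
      simp only [pvEv, if_true, List.count_cons, List.count_nil, he, beq_iff_eq]
      by_cases hv : v = pvAv a t
      · subst hv
        simp
        omega
      · simp [hv, Ne.symm hv]
    · have he : ¬ pvAv a i = pvAv a t := by simpa using h
      simp only [pvEv, h]
      by_cases hv : v = pvAv a t
      · simp [hv]
      · simp [hv]

theorem block_count (K : Int) (a : List Int) (j v : Int) :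
    (pvBlock K a j).count v =
      if v = pvAv a j then
        2 * (((PySem.List.pyRange (max 0 (j - K)) j 1).map (pvAv a)).count (pvAv a j))
      else 0 := by
  rw [pvBlock, List.flatMap_map]
  exact block_count_aux a j v _

-- ---- B's loop invariant ----
theorem EB_succ (K : Int) (a : List Int) (n : Int) (hn : 0 ≤ n) :
    pvEB (n + 1) K a = pvEB n K a ++ pvBlock K a n := by
  unfold pvEB pvPB pvBlock
  rw [PySem.List.pyRange_one_succ_right hn, List.flatMap_append, List.flatMap_append]
  simp [List.flatMap_cons]


theorem stepB_inv (K : Int) (a : List Int) (hK : 1 ≤ K) (n : Nat) :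
    (∀ v, ((PySem.List.pyRange 0 (n : Int) 1).foldl (pvStepB K a)
        (PySem.Dict.empty, PySem.Dict.empty)).1.getD v 0 = ((pvWinL K a n).count v : Int)) ∧
    (∀ v, ((PySem.List.pyRange 0 (n : Int) 1).foldl (pvStepB K a)
        (PySem.Dict.empty, PySem.Dict.empty)).2.getD v 0 = ((pvEB (n : Int) K a).count v : Int)) ∧
    (∀ v, v ∈ ((PySem.List.pyRange 0 (n : Int) 1).foldl (pvStepB K a)
        (PySem.Dict.empty, PySem.Dict.empty)).2.keys ↔ v ∈ pvEB (n : Int) K a) ∧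
    ((PySem.List.pyRange 0 (n : Int) 1).foldl (pvStepB K a)
        (PySem.Dict.empty, PySem.Dict.empty)).2.keys.Nodup := by
  induction n with
  | zero =>
    have h0 : PySem.List.pyRange 0 ((0 : Nat) : Int) 1 = [] :=
      PySem.List.pyRange_one_eq_nil (by norm_num)
    have hw0 : pvWinL K a ((0 : Nat) : Int) = [] := by
      unfold pvWinL
      rw [PySem.List.pyRange_one_eq_nil (by omega)]
      rfl
    have he0 : pvEB ((0 : Nat) : Int) K a = [] := by
      unfold pvEB pvPB
      rw [PySem.List.pyRange_one_eq_nil (by norm_num)]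
      rfl
    rw [h0, hw0, he0]
    simp [PySem.Dict.getD_empty, PySem.Dict.keys_empty]
  | succ n ih =>
    obtain ⟨ihw, ihc, ihk, ihnd⟩ := ih
    have hm : (0 : Int) ≤ (n : Int) := by positivity
    have hcast : (((n + 1 : Nat)) : Int) = (n : Int) + 1 := by push_cast; ring
    rw [hcast, PySem.List.pyRange_one_succ_right hm, List.foldl_append, List.foldl_cons,
      List.foldl_nil]
    set st := (PySem.List.pyRange 0 (n : Int) 1).foldl (pvStepB K a)
      (PySem.Dict.empty, PySem.Dict.empty) with hst
    set m : Int := (n : Int) with hmdef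
    -- the window after eviction
    have hwin' : ∀ v,
        (if m - K - 1 ≥ 0 then
            st.1.insert (PySem.List.pyGetD a (m - K - 1) 0)
              (st.1.getD (PySem.List.pyGetD a (m - K - 1) 0) 0 - 1)
          else st.1).getD v 0 =
        (((PySem.List.pyRange (max 0 (m - K)) m 1).map (pvAv a)).count v : Int) := by
      intro v
      by_cases hold : m - K - 1 ≥ 0
      · rw [if_pos hold, PySem.Dict.getD_insert]
        have hWn : pvWinL K a m =
            pvAv a (m - K - 1) :: ((PySem.List.pyRange (max 0 (m - K)) m 1).map (pvAv a)) := by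
          unfold pvWinL
          have h1 : max 0 (m - 1 - K) = m - K - 1 := by omega
          have h2 : max 0 (m - K) = m - K - 1 + 1 := by omega
          rw [h1, PySem.List.pyRange_one_cons (by omega), List.map_cons, h2]
        by_cases hv : v = PySem.List.pyGetD a (m - K - 1) 0
        · rw [if_pos hv, ihw, hWn, hv]
          have hbe : (pvAv a (m - K - 1) == PySem.List.pyGetD a (m - K - 1) 0) = true := by
            simp [pvAv]
          rw [List.count_cons, hbe]
          push_cast
          simp
        · rw [if_neg hv, ihw, hWn]
          have hbe : (pvAv a (m - K - 1) == v) = false := by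
            simp only [pvAv, beq_eq_false_iff_ne, ne_eq]
            exact fun h => hv h.symm
          rw [List.count_cons, hbe]
          push_cast
          simp
      · rw [if_neg hold, ihw]
        have : pvWinL K a m = (PySem.List.pyRange (max 0 (m - K)) m 1).map (pvAv a) := by
          unfold pvWinL
          have : max 0 (m - 1 - K) = max 0 (m - K) := by omega
          rw [this]
        rw [this]
    -- abbreviations for the step
    simp only [pvStepB]
    set vm : Int := PySem.List.pyGetD a m 0 with hvm
    set win' := (if m - K - 1 ≥ 0 then
        st.1.insert (PySem.List.pyGetD a (m - K - 1) 0)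
          (st.1.getD (PySem.List.pyGetD a (m - K - 1) 0) 0 - 1)
      else st.1) with hwin'def
    set WS := (PySem.List.pyRange (max 0 (m - K)) m 1).map (pvAv a) with hWS
    have hwv : win'.getD vm 0 = (WS.count vm : Int) := hwin' vm
    have hEBs : pvEB (m + 1) K a = pvEB m K a ++ pvBlock K a m := EB_succ K a m hm
    have hblock : ∀ v, (pvBlock K a m).count v =
        if v = vm then 2 * (WS.count vm) else 0 := by
      intro v
      rw [block_count]
      rfl
    have hmemblock : ∀ v, v ∈ pvBlock K a m ↔ (v = vm ∧ 0 < WS.count vm) := by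
      intro v
      rw [← List.count_pos_iff, hblock v]
      by_cases hv : v = vm
      · simp [hv]
      · simp [hv]
    have hwinL1 : pvWinL K a (m + 1) = WS ++ [vm] := by
      unfold pvWinL
      have h1 : max 0 (m + 1 - 1 - K) = max 0 (m - K) := by omega
      rw [h1, PySem.List.pyRange_one_succ_right (by omega), List.map_append]
      rfl
    refine ⟨?_, ?_, ?_, ?_⟩
    · -- window component
      intro v
      rw [PySem.Dict.getD_insert, hwinL1, List.count_append]
      by_cases hv : v = vm
      · rw [if_pos hv, hwin' vm, hv]
        have hbe : (vm == vm) = true := by simp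
        rw [List.count_cons, List.count_nil, hbe]
        push_cast
        simp
      · rw [if_neg hv, hwin' v]
        have hbe : (vm == v) = false := by
          simp only [beq_eq_false_iff_ne, ne_eq]
          exact fun h => hv h.symm
        rw [List.count_cons, List.count_nil, hbe]
        push_cast
        simp
    · -- counts component
      intro v
      rw [hEBs, List.count_append]
      by_cases hw : win'.getD vm 0 ≠ 0
      · rw [if_pos hw, PySem.Dict.getD_insert]
        by_cases hv : v = vm
        · rw [if_pos hv, ihc, hv, hblock vm, if_pos rfl, hwv]
          push_cast
          omega
        · rw [if_neg hv, ihc, hblock v, if_neg hv]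
          push_cast
          omega
      · rw [if_neg hw, ihc]
        have hz : WS.count vm = 0 := by
          have := hwv
          simp only [not_not] at hw
          omega
        rw [hblock v, hz]
        by_cases hv : v = vm
        · simp [hv]
        · simp [hv]
    · -- keys membership
      intro v
      rw [hEBs, List.mem_append, hmemblock v]
      by_cases hw : win'.getD vm 0 ≠ 0
      · rw [if_pos hw, PySem.Dict.mem_keys_insert, ihk]
        have hpos : 0 < WS.count vm := by
          have := hwv
          rcases Nat.eq_zero_or_pos (WS.count vm) with h | h
          · exfalso; apply hw; omega
          · exact h
        constructor
        · rintro (rfl | h)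
          · exact Or.inr ⟨rfl, hpos⟩
          · exact Or.inl h
        · rintro (h | ⟨rfl, _⟩)
          · exact Or.inr h
          · exact Or.inl rfl
      · rw [if_neg hw, ihk]
        have hz : WS.count vm = 0 := by
          have := hwv
          simp only [not_not] at hw
          omega
        constructor
        · exact fun h => Or.inl h
        · rintro (h | ⟨rfl, hpos⟩)
          · exact h
          · omega
    · -- nodup keys
      by_cases hw : win'.getD vm 0 ≠ 0
      · rw [if_pos hw]
        exact PySem.Dict.nodup_keys_insert _ _ _ ihnd
      · rw [if_neg hw]
        exact ihnd

-- ---- selection fold is invariant under permutation ----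
theorem sel_right_comm (s p q : Int × Int) : pvSel (pvSel s p) q = pvSel (pvSel s q) p := by
  obtain ⟨b1, b2⟩ := s; obtain ⟨p1, p2⟩ := p; obtain ⟨q1, q2⟩ := q
  simp only [pvSel]
  split_ifs <;> first | rfl | (exfalso; omega) | (simp only [Prod.mk.injEq]; constructor <;> omega)

theorem foldl_sel_perm {l₁ l₂ : List (Int × Int)} (h : l₁.Perm l₂) (s : Int × Int) :
    l₁.foldl pvSel s = l₂.foldl pvSel s := by
  induction h generalizing s with
  | nil => rfl
  | cons x _ ih => simpa [List.foldl] using ih (pvSel s x)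
  | swap x y l => simp only [List.foldl]; rw [sel_right_comm]
  | trans _ _ ih₁ ih₂ => rw [ih₁, ih₂]

-- ===== VERDICT (by name: the statement is the Claim_ definition above) =====
theorem find_most_exploded_bomb_spec : Claim_equal_find_most_exploded_bomb := by
  intro N K a _ _
  unfold Spec_find_most_exploded_bomb
  by_cases hg : K ≤ 0 ∨ N ≤ 1
  · -- degenerate case: no pair can exist, both sides return 0
    have hB : find_most_exploded_bomb_alt N K a = 0 := by
      unfold find_most_exploded_bomb_alt
      rw [if_pos hg]
    rw [hB]
    unfold find_most_exploded_bomb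
    have hempty :
        (PySem.List.pyRange 0 N 1).foldl (fun d i =>
          (PySem.List.pyRange (i + 1) (min (i + K + 1) N) 1).foldl (fun d j =>
            if PySem.List.pyGetD a i 0 == PySem.List.pyGetD a j 0 then
              ((d.modify (PySem.List.pyGetD a i 0) 0 (· + 1)).modify
                (PySem.List.pyGetD a j 0) 0 (· + 1))
            else d) d) (PySem.Dict.empty : PySem.Dict Int Int) = PySem.Dict.empty := by
      rw [PySem.List.foldl_congr_mem _ _ (fun d _ => d) _ ?_, PySem.List.foldl_ignore]
      intro d i hi
      rw [PySem.List.mem_pyRange_one] at hi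
      rw [PySem.List.pyRange_one_eq_nil (by omega), List.foldl_nil]
    rw [hempty]
    rfl
  · -- the real case: K ≥ 1 and N ≥ 2
    have hK : 1 ≤ K := by omega
    have hN0 : 0 ≤ N := by omega
    unfold find_most_exploded_bomb find_most_exploded_bomb_alt
    rw [if_neg hg]
    rw [dictA_eq N K a]
    have hstep : (fun (st : PySem.Dict Int Int × PySem.Dict Int Int) (j : Int) =>
        let old := j - K - 1
        let win :=
          if old ≥ 0 then
            st.1.insert (PySem.List.pyGetD a old 0)
              (st.1.getD (PySem.List.pyGetD a old 0) 0 - 1)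
          else st.1
        let v := PySem.List.pyGetD a j 0
        let w := win.getD v 0
        let counts := if w ≠ 0 then st.2.insert v (st.2.getD v 0 + 2 * w) else st.2
        (win.insert v (win.getD v 0 + 1), counts)) = pvStepB K a := rfl
    rw [hstep]
    obtain ⟨_, hc, hk, hnd⟩ := stepB_inv K a hK N.toNat
    rw [Int.toNat_of_nonneg hN0] at hc hk hnd
    have hperm : (PySem.Dict.counter (pvEA N K a)).items.Perm
        (((PySem.List.pyRange 0 N 1).foldl (pvStepB K a)
          (PySem.Dict.empty, PySem.Dict.empty)).2.items) := by
      rw [PySem.Dict.items_counter, PySem.Dict.items_eq_map_keys _ hnd 0]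
      have hfun : (fun k => (k,
          ((PySem.List.pyRange 0 N 1).foldl (pvStepB K a)
            (PySem.Dict.empty, PySem.Dict.empty)).2.getD k 0)) =
          (fun k : Int => (k, ((pvEA N K a).count k : Int))) := by
        funext k
        rw [hc k]
        have hcnt := (perm_EA_EB N K a hK).count_eq k
        simp [hcnt]
      rw [hfun]
      apply List.Perm.map
      refine (List.perm_ext_iff_of_nodup (PySem.Set.nodup_ofList _) hnd).mpr ?_
      intro v
      rw [PySem.Set.mem_ofList, hk v]
      exact (perm_EA_EB N K a hK).mem_iff
    have hsel : (fun (s p : Int × Int) =>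
        if p.2 > s.1 ∨ (p.2 = s.1 ∧ p.1 > s.2) then (p.2, p.1) else s) = pvSel := rfl
    show ((PySem.Dict.counter (pvEA N K a)).items.foldl (fun s p =>
        if p.2 > s.1 ∨ (p.2 = s.1 ∧ p.1 > s.2) then (p.2, p.1) else s) ((0:Int),(0:Int))).2 = _
    rw [hsel, foldl_sel_perm hperm]
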